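-- pv_equiv track=rewrite | github.com/mehrnoush-n/Lichtobjekt_v2 | 241001_uBahn_v9_Pline_works-def_side.py | replace_zeros_with_previous
-- ===== SOURCE A (Python) =====
-- def replace_zeros_with_previous(input_list):
--
--     if not input_list:  # Check if the list is empty
--         return input_list
--
--     # Initialize a variable to hold the last non-zero value
--     last_value = None
--
--     for i in range(len(input_list)):
--         if input_list[i] == 0:
--             if last_value is not None:
--                 input_list[i] = last_value  # Replace 0 with last non-zero value
--         else:
--             last_value = input_list[i]  # Update last_value to the current non-zero member
--
--     return input_list
-- ===== SOURCE B (Python) =====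
-- from itertools import groupby
--
-- def replace_zeros_with_previous(input_list):
--     # Run-length decomposition: split the list into maximal zero/nonzero runs;
--     # a zero run (unless leading) becomes its preceding value repeated.
--     out = []
--     for nonzero, run in groupby(input_list, key=lambda x: x != 0):
--         run = list(run)
--         if nonzero or not out:
--             out += run
--         else:
--             out += [out[-1]] * len(run)
--     input_list[:] = out
--     return input_list
-- ===== Notes on version B (the rewrite author's own statement) =====
-- stated objective: idiomatic
-- what changed: Replaces the per-element indexed loop with an Optional carry by a run-length decomposition: itertools.groupby splits the list into maximal zero/nonzero runs and each non-leading zero run is rebuilt wholesale as its preceding value repeated, then written back by slice assignment.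
import Mathlib
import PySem

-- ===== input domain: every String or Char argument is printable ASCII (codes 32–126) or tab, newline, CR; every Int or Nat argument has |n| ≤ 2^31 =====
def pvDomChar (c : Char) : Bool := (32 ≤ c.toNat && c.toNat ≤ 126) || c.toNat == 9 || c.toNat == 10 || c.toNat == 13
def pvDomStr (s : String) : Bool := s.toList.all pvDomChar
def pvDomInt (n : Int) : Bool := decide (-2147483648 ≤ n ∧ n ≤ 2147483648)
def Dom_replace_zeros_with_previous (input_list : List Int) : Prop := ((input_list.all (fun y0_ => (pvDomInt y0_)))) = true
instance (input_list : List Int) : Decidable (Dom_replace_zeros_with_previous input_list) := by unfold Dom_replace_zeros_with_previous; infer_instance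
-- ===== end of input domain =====

-- B replaces A's per-element indexed loop with an Optional carry by a run-length (groupby) decomposition: each non-leading zero run is rebuilt wholesale as its preceding value repeated (idiomatic; B performs the same in-place mutation as A, equivalence is about the return value).


-- ===== PORT A =====
-- A's loop over the list carrying last_value : Option Int
def pvGoA (last : Option Int) : List Int → List Int
  | [] => []
  | x :: xs =>
    if x = 0 then
      match last with
      | none => x :: pvGoA none xs
      | some v => v :: pvGoA (some v) xs
    else x :: pvGoA (some x) xs

def replace_zeros_with_previous (input_list : List Int) : List Int :=
  if input_list = [] then input_list
  else pvGoA none input_list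

-- ===== PORT B =====
-- itertools.groupby(input_list, key = fun x => x ≠ 0): maximal runs with their key
def pvRunsB : List Int → List (Bool × List Int)
  | [] => []
  | x :: xs =>
    (decide (x ≠ 0), x :: xs.takeWhile (fun y => decide (y ≠ 0) == decide (x ≠ 0))) ::
      pvRunsB (xs.dropWhile (fun y => decide (y ≠ 0) == decide (x ≠ 0)))
termination_by l => l.length
decreasing_by
  simpa using Nat.lt_succ_of_le (List.length_dropWhile_le _ _)

-- the loop body: nonzero runs (or a leading zero run) are appended as-is,
-- other zero runs are appended as out[-1] repeated
def pvBuildB : List Int → List (Bool × List Int) → List Int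
  | out, [] => out
  | out, (k, run) :: rest =>
    if k || out.isEmpty then pvBuildB (out ++ run) rest
    else pvBuildB (out ++ List.replicate run.length (out.getLastD 0)) rest

def replace_zeros_with_previous_alt (input_list : List Int) : List Int :=
  pvBuildB [] (pvRunsB input_list)

-- ===== PRECONDITION & SPEC =====
def Spec_replace_zeros_with_previous (input_list : List Int) (out : List Int) : Prop := out = replace_zeros_with_previous_alt input_list
instance (input_list : List Int) (out : List Int) : Decidable (Spec_replace_zeros_with_previous input_list out) := by unfold Spec_replace_zeros_with_previous; infer_instance

-- ===== CLAIM (what is proved, stated in full; the proofs are below) =====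
def Claim_equal_replace_zeros_with_previous : Prop := ∀ (input_list : List Int), Dom_replace_zeros_with_previous input_list → Spec_replace_zeros_with_previous input_list (replace_zeros_with_previous input_list)

-- ===== LEMMAS AND PROOFS =====

theorem pvGetLastD_append (a b : List Int) (h : b ≠ []) :
    (a ++ b).getLastD 0 = b.getLastD 0 := by
  induction a with
  | nil => rfl
  | cons x a ih =>
    cases a with
    | nil => cases b with
      | nil => exact absurd rfl h
      | cons y b => simp [List.getLastD]
    | cons z a => simpa [List.getLastD] using ih

theorem pvGetLastD_mem (x : Int) (l : List Int) : (x :: l).getLastD 0 ∈ x :: l := by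
  induction l generalizing x with
  | nil => simp [List.getLastD]
  | cons y l ih =>
    have h := ih y
    simp only [List.getLastD] at h ⊢
    exact List.mem_cons_of_mem _ h

theorem pvGetLastD_replicate (n : Nat) (v : Int) :
    (List.replicate (n + 1) v).getLastD 0 = v := by
  induction n with
  | zero => rfl
  | succ n ih => simpa [List.replicate_succ, List.getLastD] using ih

theorem pvHead_dropWhile (p : Int → Bool) (l : List Int) (a : Int)
    (h : (l.dropWhile p).head? = some a) : p a = false := by
  induction l with
  | nil => simp [List.dropWhile] at h
  | cons x xs ih =>
    by_cases hp : p x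
    · exact ih (by simpa [List.dropWhile, hp] using h)
    · simp [List.dropWhile, hp] at h
      simpa [h] using hp

theorem pvRunsB_nil : pvRunsB [] = [] := by rw [pvRunsB]

-- pvGoA over a zero run with a nonzero carry
theorem pvGoA_zero_run (zs rest : List Int) (v : Int) (hz : ∀ z ∈ zs, z = 0) :
    pvGoA (some v) (zs ++ rest) = List.replicate zs.length v ++ pvGoA (some v) rest := by
  induction zs with
  | nil => rfl
  | cons z zs ih =>
    have hz0 : z = 0 := hz z (by simp)
    simp [pvGoA, hz0, List.replicate_succ, ih (fun a ha => hz a (by simp [ha]))]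

-- pvGoA over a zero run with no carry
theorem pvGoA_zero_run_none (zs rest : List Int) (hz : ∀ z ∈ zs, z = 0) :
    pvGoA none (zs ++ rest) = zs ++ pvGoA none rest := by
  induction zs with
  | nil => rfl
  | cons z zs ih =>
    have hz0 : z = 0 := hz z (by simp)
    simp [pvGoA, hz0, ih (fun a ha => hz a (by simp [ha]))]

-- pvGoA over a nonzero run, any incoming state
theorem pvGoA_nonzero_run (x : Int) (ns rest : List Int) (s : Option Int)
    (hx : x ≠ 0) (hn : ∀ y ∈ ns, y ≠ 0) :
    pvGoA s (x :: ns ++ rest) = (x :: ns) ++ pvGoA (some ((x :: ns).getLastD 0)) rest := by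
  induction ns generalizing x s with
  | nil => simp [pvGoA, hx, List.getLastD]
  | cons y ns ih =>
    have hy : y ≠ 0 := hn y (by simp)
    have h1 := ih y (some x) hy (fun a ha => hn a (by simp [ha]))
    have h2 : (x :: y :: ns).getLastD 0 = (y :: ns).getLastD 0 := by simp [List.getLastD]
    simp only [List.cons_append] at h1 ⊢
    rw [h2, ← h1]
    simp [pvGoA, hx]

-- main invariant for B's fold over the runs, by strong induction on the length
theorem pvBuild_inv : ∀ (n : Nat) (xs out : List Int), xs.length ≤ n →
    (out.getLastD 0 ≠ 0 → pvBuildB out (pvRunsB xs) = out ++ pvGoA (some (out.getLastD 0)) xs)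
    ∧ (out = [] → pvBuildB out (pvRunsB xs) = pvGoA none xs)
    ∧ (out ≠ [] → out.getLastD 0 = 0 → (∀ a, xs.head? = some a → a ≠ 0) →
        pvBuildB out (pvRunsB xs) = out ++ pvGoA none xs) := by
  intro n
  induction n with
  | zero =>
    intro xs out hlen
    have : xs = [] := List.length_eq_zero_iff.mp (Nat.le_zero.mp hlen)
    subst this
    refine ⟨fun _ => ?_, fun h => ?_, fun _ _ _ => ?_⟩
    · simp [pvRunsB_nil, pvBuildB, pvGoA]
    · subst h; simp [pvRunsB_nil, pvBuildB, pvGoA]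
    · simp [pvRunsB_nil, pvBuildB, pvGoA]
  | succ n ih =>
    intro xs out hlen
    cases xs with
    | nil =>
      refine ⟨fun _ => ?_, fun h => ?_, fun _ _ _ => ?_⟩
      · simp [pvRunsB_nil, pvBuildB, pvGoA]
      · subst h; simp [pvRunsB_nil, pvBuildB, pvGoA]
      · simp [pvRunsB_nil, pvBuildB, pvGoA]
    | cons x t =>
      by_cases hx : x = 0
      · -- zero run
        subst hx
        set ts := t.takeWhile (fun y => decide (y ≠ 0) == decide ((0:Int) ≠ 0)) with hts
        set rest := t.dropWhile (fun y => decide (y ≠ 0) == decide ((0:Int) ≠ 0)) with hrest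
        have hsplit : t = ts ++ rest := (List.takeWhile_append_dropWhile).symm
        have hruns : pvRunsB ((0:Int) :: t) = (false, (0:Int) :: ts) :: pvRunsB rest := by
          rw [pvRunsB, ← hts, ← hrest]
          simp
        have htz : ∀ z ∈ (0:Int) :: ts, z = 0 := by
          intro z hz
          rcases List.mem_cons.mp hz with h | h
          · exact h
          · simpa using List.mem_takeWhile_imp h
        have hlenr : rest.length ≤ n := by
          have h2 := List.length_dropWhile_le (fun y => decide (y ≠ 0) == decide ((0:Int) ≠ 0)) t
          rw [← hrest] at h2
          simp at hlen; omega
        have hhead : ∀ a, rest.head? = some a → a ≠ 0 := by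
          intro a ha
          have := pvHead_dropWhile _ t a ha
          simpa using this
        refine ⟨?_, ?_, ?_⟩
        · -- carry v ≠ 0
          intro hv
          have hne : out ≠ [] := by
            intro h; subst h; simp [List.getLastD] at hv
          have hbr : pvBuildB out (pvRunsB ((0:Int) :: t))
              = pvBuildB (out ++ List.replicate ((0:Int) :: ts).length (out.getLastD 0)) (pvRunsB rest) := by
            rw [hruns, pvBuildB]
            simp [List.isEmpty_iff, hne]
          have hlast : (out ++ List.replicate ((0:Int) :: ts).length (out.getLastD 0)).getLastD 0 = out.getLastD 0 := by
            rw [pvGetLastD_append _ _ (by simp), List.length_cons, pvGetLastD_replicate]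
          have hIH := (ih rest (out ++ List.replicate ((0:Int) :: ts).length (out.getLastD 0)) hlenr).1
            (by rw [hlast]; exact hv)
          rw [hbr, hIH, hlast]
          have hgo : pvGoA (some (out.getLastD 0)) ((0:Int) :: t)
              = List.replicate ((0:Int) :: ts).length (out.getLastD 0) ++ pvGoA (some (out.getLastD 0)) rest := by
            have := pvGoA_zero_run ((0:Int) :: ts) rest (out.getLastD 0) htz
            rw [hsplit]; simpa using this
          rw [hgo]; simp
        · -- out = []
          intro h; subst h
          have hbr : pvBuildB [] (pvRunsB ((0:Int) :: t))
              = pvBuildB ((0:Int) :: ts) (pvRunsB rest) := by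
            rw [hruns, pvBuildB]; simp
          have hlast : ((0:Int) :: ts).getLastD 0 = 0 := htz _ (pvGetLastD_mem 0 ts)
          have hIH := (ih rest ((0:Int) :: ts) hlenr).2.2 (by simp) hlast hhead
          rw [hbr, hIH]
          have hg := pvGoA_zero_run_none ((0:Int) :: ts) rest htz
          rw [hsplit]
          simp only [List.cons_append] at hg ⊢
          exact hg.symm
        · -- out ends in 0 but head must be nonzero: vacuous
          intro _ _ hh
          exact absurd rfl (hh 0 (by simp))
      · -- nonzero run
        set ts := t.takeWhile (fun y => decide (y ≠ 0) == decide (x ≠ 0)) with hts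
        set rest := t.dropWhile (fun y => decide (y ≠ 0) == decide (x ≠ 0)) with hrest
        have hsplit : t = ts ++ rest := (List.takeWhile_append_dropWhile).symm
        have hruns : pvRunsB (x :: t) = (true, x :: ts) :: pvRunsB rest := by
          rw [pvRunsB, ← hts, ← hrest]
          simp [hx]
        have htn : ∀ y ∈ ts, y ≠ 0 := by
          intro y hy
          have := List.mem_takeWhile_imp hy
          simp [hx] at this
          exact this
        have hlenr : rest.length ≤ n := by
          have h2 := List.length_dropWhile_le (fun y => decide (y ≠ 0) == decide (x ≠ 0)) t
          rw [← hrest] at h2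
          simp at hlen; omega
        have hlast : (out ++ x :: ts).getLastD 0 = (x :: ts).getLastD 0 :=
          pvGetLastD_append _ _ (by simp)
        have hlastne : (x :: ts).getLastD 0 ≠ 0 := by
          rcases List.mem_cons.mp (pvGetLastD_mem x ts) with h | h
          · rw [h]; exact hx
          · exact htn _ h
        have hbr : pvBuildB out (pvRunsB (x :: t)) = pvBuildB (out ++ x :: ts) (pvRunsB rest) := by
          rw [hruns, pvBuildB]; simp
        have hIH := (ih rest (out ++ x :: ts) hlenr).1 (by rw [hlast]; exact hlastne)
        have hgo : ∀ s, pvGoA s (x :: t) = (x :: ts) ++ pvGoA (some ((x :: ts).getLastD 0)) rest := by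
          intro s
          have := pvGoA_nonzero_run x ts rest s hx htn
          rw [hsplit]; simpa using this
        refine ⟨?_, ?_, ?_⟩
        · intro _
          rw [hbr, hIH, hlast, hgo]; simp
        · intro h; subst h
          rw [hbr, hIH, hlast] at *
          rw [hgo]; simp
        · intro _ _ _
          rw [hbr, hIH, hlast, hgo]; simp

-- ===== VERDICT (by name: the statement is the Claim_ definition above) =====
theorem replace_zeros_with_previous_spec : Claim_equal_replace_zeros_with_previous := by
  intro l _
  unfold Spec_replace_zeros_with_previous replace_zeros_with_previous replace_zeros_with_previous_alt
  have h := (pvBuild_inv l.length l [] le_rfl).2.1 rfl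
  cases l with
  | nil => simp [pvRunsB_nil, pvBuildB]
  | cons x xs => simpa using h.symm
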